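-- pv_equiv track=rewrite | github.com/eallrich/checkniner | scripts/utilities/parse_analytics.py | escape_quoted_spaces
-- ===== SOURCE A (Python) =====
-- def escape_quoted_spaces(line):
--     in_quote = False
--     replacement = '!@#'
--     new_line = ""
--     for c in line:
--         new_c = c
--         if c == '"':
--             in_quote = not in_quote
--             new_c = ''
--         elif c == ' ' and in_quote:
--             new_c = replacement
--         new_line += new_c
--     return new_line
-- ===== SOURCE B (Python) =====
-- def escape_quoted_spaces(line):
--     parts = line.split('"')
--     return ''.join(p.replace(' ', '!@#') if i % 2 == 1 else p
--                    for i, p in enumerate(parts))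
-- ===== Notes on version B (the rewrite author's own statement) =====
-- stated objective: faster
-- what changed: Replaces A's character-by-character in_quote state machine with splitting the line on the double-quote character, replacing spaces only in odd-indexed (inside-quote) parts, and joining.
import Mathlib
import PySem

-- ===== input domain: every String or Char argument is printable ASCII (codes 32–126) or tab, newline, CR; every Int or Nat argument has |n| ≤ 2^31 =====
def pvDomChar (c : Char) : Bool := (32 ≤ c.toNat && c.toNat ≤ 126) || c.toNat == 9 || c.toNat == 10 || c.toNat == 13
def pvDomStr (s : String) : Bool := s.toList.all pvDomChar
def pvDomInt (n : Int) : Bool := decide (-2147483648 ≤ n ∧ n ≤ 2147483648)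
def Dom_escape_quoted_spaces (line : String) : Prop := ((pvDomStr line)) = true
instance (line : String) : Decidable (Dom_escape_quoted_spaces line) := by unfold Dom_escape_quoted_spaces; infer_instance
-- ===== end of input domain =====

-- B is simpler: split the line on '"' (odd-indexed parts are inside quotes), replace spaces
-- only in odd parts and re-join, instead of A's character-by-character state machine.

-- ===== PORT A =====
-- literal port of A: fold over the characters with state (in_quote, new_line)
def escape_quoted_spaces (line : String) : String :=
  let st := line.toList.foldl
    (fun (st : Bool × List Char) c =>
      let inq := st.1
      if c = '"' then (!inq, st.2)
      else if c = ' ' ∧ inq then (inq, st.2 ++ ['!', '@', '#'])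
      else (inq, st.2 ++ [c]))
    (false, [])
  String.mk st.2

-- ===== PORT B =====
-- literal port of Source B: parts = line.split('"'); ''.join(p.replace(' ','!@#') if i%2==1 else p)
def escape_quoted_spaces_alt (line : String) : String :=
  let parts := PySem.Chars.splitOn line.toList ['"']
  String.mk (PySem.Chars.join []
    ((PySem.List.enumerate parts).map
      (fun ip => if PySem.Int.mod ip.1 2 == 1
                 then PySem.Chars.replace ip.2 [' '] ['!', '@', '#']
                 else ip.2)))

-- ===== PRECONDITION & SPEC =====
def Spec_escape_quoted_spaces (line : String) (out : String) : Prop := out = escape_quoted_spaces_alt line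
instance (line : String) (out : String) : Decidable (Spec_escape_quoted_spaces line out) := by unfold Spec_escape_quoted_spaces; infer_instance

-- ===== CLAIM (what is proved, stated in full; the proofs are below) =====
def Claim_equal_escape_quoted_spaces : Prop := ∀ (line : String), Dom_escape_quoted_spaces line → Spec_escape_quoted_spaces line (escape_quoted_spaces line)

-- ===== LEMMAS AND PROOFS =====

-- structural model of split on the single character '"'
def splitQ : List Char → List (List Char)
  | [] => [[]]
  | c :: cs => if c = '"' then [] :: splitQ cs else (splitQ cs).modifyHead (c :: ·)

-- structural model of replacing each space by "!@#"
def replQ : List Char → List Char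
  | [] => []
  | c :: cs => (if c = ' ' then ['!', '@', '#'] else [c]) ++ replQ cs

-- structural model of A's state machine (pure, no accumulator)
def auxA : List Char → Bool → List Char
  | [], _ => []
  | c :: cs, b =>
      if c = '"' then auxA cs (!b)
      else if c = ' ' ∧ b then '!' :: '@' :: '#' :: auxA cs b
      else c :: auxA cs b

-- alternating processing of the split parts (true = inside a quote)
def procQ : List (List Char) → Bool → List (List Char)
  | [], _ => []
  | p :: ps, b => (if b then replQ p else p) :: procQ ps (!b)

theorem splitQ_ne_nil (cs : List Char) : splitQ cs ≠ [] := by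
  cases cs with
  | nil => simp [splitQ]
  | cons c cs =>
      simp only [splitQ]; split
      · simp
      · cases h : splitQ cs with
        | nil => exact absurd h (splitQ_ne_nil cs)
        | cons p ps => simp [List.modifyHead]

-- head-prepend helper for the splitOn.go lemma
def consHead (pre : List Char) : List (List Char) → List (List Char)
  | [] => [pre]
  | p :: ps => (pre ++ p) :: ps

theorem splitOn_go_spec (fuel : Nat) (l cur : List Char) (acc2 : List (List Char))
    (h : l.length < fuel) :
    PySem.Chars.splitOn.go ['"'] fuel l cur acc2 = acc2.reverse ++ consHead cur.reverse (splitQ l) := by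
  induction fuel generalizing l cur acc2 with
  | zero => omega
  | succ f ih =>
    cases l with
    | nil => simp [PySem.Chars.splitOn.go, splitQ, consHead]
    | cons c rest =>
      by_cases hc : c = '"'
      · subst hc
        rw [show PySem.Chars.splitOn.go ['"'] (f+1) ('"' :: rest) cur acc2
              = PySem.Chars.splitOn.go ['"'] f rest [] (cur.reverse :: acc2) from by
            simp [PySem.Chars.splitOn.go, List.isPrefixOf]]
        rw [ih rest [] (cur.reverse :: acc2) (by simpa using Nat.lt_of_succ_lt_succ h)]
        cases hs : splitQ rest with
        | nil => exact absurd hs (splitQ_ne_nil rest)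
        | cons p ps => simp [splitQ, consHead, hs]
      · rw [show PySem.Chars.splitOn.go ['"'] (f+1) (c :: rest) cur acc2
              = PySem.Chars.splitOn.go ['"'] f rest (c :: cur) acc2 from by
            simp [PySem.Chars.splitOn.go, List.isPrefixOf, (Ne.symm hc : ¬'"' = c)]]
        rw [ih rest (c :: cur) acc2 (by simpa using Nat.lt_of_succ_lt_succ h)]
        cases hs : splitQ rest with
        | nil => exact absurd hs (splitQ_ne_nil rest)
        | cons p ps => simp [splitQ, consHead, hs, hc, List.modifyHead]

theorem splitOn_eq_splitQ (cs : List Char) :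
    PySem.Chars.splitOn cs ['"'] = splitQ cs := by
  rw [PySem.Chars.splitOn, splitOn_go_spec _ _ _ _ (by omega)]
  cases hs : splitQ cs with
  | nil => exact absurd hs (splitQ_ne_nil cs)
  | cons p ps => simp [consHead]

theorem replace_go_spec (fuel : Nat) (l acc : List Char) (h : l.length ≤ fuel) :
    PySem.Chars.replace.go [' '] ['!', '@', '#'] fuel l acc = acc.reverse ++ replQ l := by
  induction fuel generalizing l acc with
  | zero =>
    have : l = [] := by cases l <;> simp_all
    subst this; simp [PySem.Chars.replace.go, replQ]
  | succ f ih =>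
    cases l with
    | nil => simp [PySem.Chars.replace.go, replQ]
    | cons c rest =>
      by_cases hc : c = ' '
      · subst hc
        rw [show PySem.Chars.replace.go [' '] ['!','@','#'] (f+1) (' ' :: rest) acc
              = PySem.Chars.replace.go [' '] ['!','@','#'] f rest ('#'::'@'::'!'::acc) from by
            simp [PySem.Chars.replace.go, List.isPrefixOf]]
        rw [ih rest _ (by simpa using h)]
        simp [replQ]
      · rw [show PySem.Chars.replace.go [' '] ['!','@','#'] (f+1) (c :: rest) acc
              = PySem.Chars.replace.go [' '] ['!','@','#'] f rest (c :: acc) from by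
            simp [PySem.Chars.replace.go, List.isPrefixOf, (Ne.symm hc : ¬' ' = c)]]
        rw [ih rest _ (by simpa using h)]
        simp [replQ, hc]

theorem replace_eq_replQ (p : List Char) :
    PySem.Chars.replace p [' '] ['!', '@', '#'] = replQ p := by
  rw [PySem.Chars.replace]
  simp only [List.isEmpty_cons, if_neg Bool.false_ne_true]
  exact replace_go_spec _ _ _ le_rfl

theorem enum_map_eq_procQ (parts : List (List Char)) (i : Int) (hi : 0 ≤ i) :
    (PySem.List.enumerate parts i).map
      (fun ip => if PySem.Int.mod ip.1 2 == 1
                 then PySem.Chars.replace ip.2 [' '] ['!', '@', '#']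
                 else ip.2)
      = procQ parts (i % 2 == 1) := by
  induction parts generalizing i with
  | nil => simp [procQ]
  | cons p ps ih =>
    rw [PySem.List.enumerate_cons, List.map_cons, ih (i+1) (by omega)]
    have hm : PySem.Int.mod i 2 = i % 2 := Int.fmod_eq_emod_of_nonneg i (by norm_num)
    have h2 : ((i+1) % 2 == 1) = !(i % 2 == 1) := by
      rcases Int.emod_two_eq_zero_or_one i with h | h <;> simp [Int.add_emod, h]
    rw [procQ, h2, hm, replace_eq_replQ]

theorem flatten_procQ (cs : List Char) (b : Bool) :
    (procQ (splitQ cs) b).flatten = auxA cs b := by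
  induction cs generalizing b with
  | nil => cases b <;> simp [splitQ, procQ, replQ, auxA]
  | cons c cs ih =>
    by_cases hc : c = '"'
    · subst hc
      have := ih (!b)
      cases hs : splitQ cs with
      | nil => exact absurd hs (splitQ_ne_nil cs)
      | cons p ps =>
        rw [hs] at this
        cases b <;> simp_all [splitQ, procQ, auxA, replQ]
    · have := ih b
      cases hs : splitQ cs with
      | nil => exact absurd hs (splitQ_ne_nil cs)
      | cons p ps =>
        rw [hs] at this
        by_cases hsp : c = ' '
        · subst hsp
          cases b <;> simp_all [splitQ, procQ, auxA, replQ, List.modifyHead]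
        · cases b <;> simp_all [splitQ, procQ, auxA, replQ, List.modifyHead]

theorem join_nil_eq_flatten (ps : List (List Char)) :
    PySem.Chars.join [] ps = ps.flatten := by
  induction ps with
  | nil => simp [PySem.Chars.join, List.intercalate]
  | cons p ps ih =>
    cases ps with
    | nil => simp [PySem.Chars.join, List.intercalate]
    | cons q qs =>
      rw [PySem.Chars.join_cons_cons] at *
      simp [ih]

theorem foldA_spec (cs : List Char) (b : Bool) (acc : List Char) :
    (cs.foldl
      (fun (st : Bool × List Char) c =>
        let inq := st.1
        if c = '"' then (!inq, st.2)
        else if c = ' ' ∧ inq then (inq, st.2 ++ ['!', '@', '#'])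
        else (inq, st.2 ++ [c]))
      (b, acc)).2 = acc ++ auxA cs b := by
  induction cs generalizing b acc with
  | nil => simp [auxA]
  | cons c cs ih =>
    by_cases hc : c = '"'
    · subst hc; simp [List.foldl, ih, auxA]
    · by_cases hs : c = ' ' ∧ b
      · obtain ⟨hs, hb⟩ := hs; subst hs hb
        simp [List.foldl, hc, ih, auxA]
      · simp [List.foldl, hc, hs, ih, auxA]

-- ===== VERDICT (by name: the statement is the Claim_ definition above) =====
theorem escape_quoted_spaces_spec : Claim_equal_escape_quoted_spaces := by
  intro line _
  unfold Spec_escape_quoted_spaces escape_quoted_spaces escape_quoted_spaces_alt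
  simp only [foldA_spec, List.nil_append, splitOn_eq_splitQ,
    enum_map_eq_procQ _ 0 le_rfl, join_nil_eq_flatten]
  norm_num [flatten_procQ]
  rfl
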